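-- pv_equiv track=rewrite | github.com/crespovictor/paper_data | 2022-09-22/random/data_parser.py | get_number_of_lane_changes
-- ===== SOURCE A (Python) =====
-- def get_number_of_lane_changes(data):
-- 	lane_changes = []
-- 	for i in range(len(data)):
-- 		lc = 0
-- 		for j in range(1, len(data[0])):
-- 			if data[i][j][1] - data[i][j-1][1] != 0:
-- 				lc += 1
-- 		lane_changes.append(lc)
-- 	return lane_changes
-- ===== SOURCE B (Python) =====
-- def get_number_of_lane_changes(data):
-- 	m = len(data[0]) if data else 0
-- 	cols = [[row[j][1] for row in data] for j in range(m)]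
-- 	counts = [0] * len(data)
-- 	for prev, cur in zip(cols, cols[1:]):
-- 		counts = [c + (a != b) for c, a, b in zip(counts, prev, cur)]
-- 	return counts
-- ===== Notes on version B (the rewrite author's own statement) =====
-- stated objective: alternative
-- what changed: B transposes the data into lane columns and sweeps column-major: for each adjacent column pair it adds an elementwise inequality vector to a per-row counter vector, instead of A's row-by-row inner index loop.
-- outside the precondition, e.g. on get_number_of_lane_changes([[(0, 0)], []]): A returns [0, 0], B raises IndexError
import Mathlib
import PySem

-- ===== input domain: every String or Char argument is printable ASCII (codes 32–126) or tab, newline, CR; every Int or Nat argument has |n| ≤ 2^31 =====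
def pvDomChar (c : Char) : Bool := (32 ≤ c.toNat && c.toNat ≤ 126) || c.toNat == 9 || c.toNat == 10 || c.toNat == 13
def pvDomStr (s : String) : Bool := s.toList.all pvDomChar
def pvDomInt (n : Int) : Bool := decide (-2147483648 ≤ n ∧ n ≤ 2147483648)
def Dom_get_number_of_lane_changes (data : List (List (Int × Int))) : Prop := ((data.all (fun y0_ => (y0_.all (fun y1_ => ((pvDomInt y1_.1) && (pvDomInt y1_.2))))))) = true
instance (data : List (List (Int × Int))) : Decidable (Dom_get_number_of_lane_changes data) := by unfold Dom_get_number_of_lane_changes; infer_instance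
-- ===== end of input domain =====

-- B transposes the data into lane columns and sweeps column-major, adding an elementwise
-- inequality vector per adjacent column pair to a per-row counter vector: an alternative
-- algorithm (different traversal order) of the same cost as A's row-by-row index loop.

-- ===== PORT A =====
-- Literal port of A: index loops over range(len(data)) and range(1, len(data[0])).
-- pyGetD is exact here: Pre_ guarantees every index taken is in range (Python raises otherwise).
def get_number_of_lane_changes (data : List (List (Int × Int))) : List Int :=
  (PySem.List.pyRange 0 (data.length : Int) 1).foldl
    (fun lane_changes i =>
      let lc : Int :=
        (PySem.List.pyRange 1 ((PySem.List.pyGetD data 0 []).length : Int) 1).foldl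
          (fun lc j =>
            if (PySem.List.pyGetD (PySem.List.pyGetD data i []) j (0, 0)).2
               - (PySem.List.pyGetD (PySem.List.pyGetD data i []) (j - 1) (0, 0)).2 ≠ 0
            then lc + 1 else lc) 0
      lane_changes ++ [lc]) []

-- ===== PORT B =====
-- B's loop body: counts = [c + (a != b) for c, a, b in zip(counts, prev, cur)]
def pvColStep (counts : List Int) (pc : List Int × List Int) : List Int :=
  ((counts.zip pc.1).zip pc.2).map (fun t => t.1.1 + (if t.1.2 ≠ t.2 then 1 else 0))

-- Literal port of B: transpose the first len(data[0]) columns of lane values, then fold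
-- pvColStep over adjacent column pairs starting from the all-zero counter vector.
def get_number_of_lane_changes_alt (data : List (List (Int × Int))) : List Int :=
  let m : Nat := if data = [] then 0 else (PySem.List.pyGetD data 0 []).length
  let cols : List (List Int) :=
    (List.range m).map (fun (j : Nat) => data.map (fun row => (PySem.List.pyGetD row (j : Int) (0, 0)).2))
  (cols.zip cols.tail).foldl pvColStep (List.replicate data.length 0)

-- ===== PRECONDITION & SPEC =====
-- Pre_ excludes ragged inputs where some row is shorter than the first row: there Python A
-- raises IndexError whenever the first row has ≥ 2 points, and in the one remaining degenerate
-- case (single-point first row plus an empty row) A's returned 0 is an artefact of never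
-- indexing that row while B's uniform column transpose itself raises IndexError.
def Pre_get_number_of_lane_changes (data : List (List (Int × Int))) : Prop :=
  ∀ row ∈ data, (data.headD []).length ≤ row.length
instance (data : List (List (Int × Int))) : Decidable (Pre_get_number_of_lane_changes data) := by
  unfold Pre_get_number_of_lane_changes; infer_instance
def pvWitness_get_number_of_lane_changes : (List (List (Int × Int))) :=
  [[(0, 1), (1, 2), (2, 2)], [(0, 0), (1, 0), (2, 1)]]
def Spec_get_number_of_lane_changes (data : List (List (Int × Int))) (out : List Int) : Prop := out = get_number_of_lane_changes_alt data
instance (data : List (List (Int × Int))) (out : List Int) : Decidable (Spec_get_number_of_lane_changes data out) := by unfold Spec_get_number_of_lane_changes; infer_instance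

-- ===== CLAIM (what is proved, stated in full; the proofs are below) =====
def Claim_equal_get_number_of_lane_changes : Prop := ∀ (data : List (List (Int × Int))), Dom_get_number_of_lane_changes data → Pre_get_number_of_lane_changes data → Spec_get_number_of_lane_changes data (get_number_of_lane_changes data)

-- ===== LEMMAS AND PROOFS =====

-- number of adjacent unequal pairs in a list
def pvChanges : List Int → Int
  | [] => 0
  | [_] => 0
  | a :: b :: t => (if a ≠ b then 1 else 0) + pvChanges (b :: t)

theorem pvChanges_append_last (l : List Int) (a x : Int) :
    pvChanges (l ++ [a] ++ [x]) = pvChanges (l ++ [a]) + (if a ≠ x then 1 else 0) := by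
  induction l generalizing a with
  | nil => simp [pvChanges]
  | cons c t ih =>
    cases t with
    | nil => simp [pvChanges]
    | cons d t' =>
      have h3 := ih a
      simp only [List.cons_append] at h3 ⊢
      simp only [pvChanges] at h3 ⊢
      omega

-- A's inner loop over indices 1..m computes pvChanges of the first m+1 samples of f
theorem pvFoldA (f : Nat → Int) (m : Nat) :
    (List.range m).foldl (fun lc k => if f (k + 1) - f k ≠ 0 then lc + 1 else lc) 0
      = pvChanges ((List.range (m + 1)).map f) := by
  induction m with
  | zero => simp [pvChanges]
  | succ m ih =>
    rw [List.range_succ, List.foldl_append, ih]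
    rw [show m + 1 + 1 = (m + 1) + 1 from rfl, List.range_succ (n := m + 1), List.range_succ (n := m)]
    simp only [List.map_append, List.map_cons, List.map_nil, List.foldl_cons, List.foldl_nil]
    rw [List.append_assoc, ← List.append_assoc (List.map f (List.range m)), pvChanges_append_last]
    by_cases h : f m = f (m + 1)
    · simp [h]
    · rw [if_pos (sub_ne_zero_of_ne (Ne.symm h)), if_pos h]

-- A's per-row fold equals pvChanges of the row's lane column
theorem pvRowA (row : List (Int × Int)) (m : Nat) :
    (PySem.List.pyRange 1 (m : Int) 1).foldl
        (fun lc j =>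
          if (PySem.List.pyGetD row j (0, 0)).2 - (PySem.List.pyGetD row (j - 1) (0, 0)).2 ≠ 0
          then lc + 1 else lc) 0
      = pvChanges ((List.range m).map (fun k => (row.getD k (0, 0)).2)) := by
  rw [PySem.List.pyRange_one, List.foldl_map]
  have hidx : ∀ k : Nat,
      (PySem.List.pyGetD row (1 + (k : Int)) (0, 0)).2 = (row.getD (k + 1) (0, 0)).2 ∧
      (PySem.List.pyGetD row (1 + (k : Int) - 1) (0, 0)).2 = (row.getD k (0, 0)).2 := by
    intro k
    constructor
    · rw [show (1 + (k : Int)) = ((k + 1 : Nat) : Int) by push_cast; ring, PySem.List.pyGetD_natCast]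
    · rw [show (1 + (k : Int) - 1) = ((k : Nat) : Int) by omega, PySem.List.pyGetD_natCast]
  cases m with
  | zero => simp [pvChanges]
  | succ m =>
    rw [show (((m + 1 : Nat) : Int) - 1).toNat = m by omega]
    rw [← pvFoldA (fun k => (row.getD k (0, 0)).2) m]
    congr 1
    funext lc k
    rw [(hidx k).1, (hidx k).2]

-- counting unequal adjacent pairs via zip-with-tail equals pvChanges
theorem pvZipFold (l : List Int) (c : Int) :
    (l.zip l.tail).foldl (fun c ab => c + if ab.1 ≠ ab.2 then 1 else 0) c
      = c + pvChanges l := by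
  induction l generalizing c with
  | nil => simp [pvChanges]
  | cons x t ih =>
    cases t with
    | nil => simp [pvChanges]
    | cons y t' =>
      simp only [List.tail_cons] at ih ⊢
      simp only [List.zip_cons_cons, List.foldl_cons]
      rw [ih]
      simp only [pvChanges]
      omega

theorem pvColStep_length (init : List Int) (p : List Int × List Int)
    (h1 : init.length ≤ p.1.length) (h2 : init.length ≤ p.2.length) :
    (pvColStep init p).length = init.length := by
  simp [pvColStep]
  omega

theorem pvColStep_getD (init : List Int) (p : List Int × List Int) (i : Nat)
    (hi : i < init.length) (h1 : init.length ≤ p.1.length) (h2 : init.length ≤ p.2.length) :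
    (pvColStep init p).getD i 0
      = init.getD i 0 + if p.1.getD i 0 ≠ p.2.getD i 0 then 1 else 0 := by
  have hl : i < (pvColStep init p).length := by rw [pvColStep_length init p h1 h2]; exact hi
  rw [List.getD_eq_getElem _ _ hl, List.getD_eq_getElem _ _ hi,
    List.getD_eq_getElem _ _ (by omega : i < p.1.length),
    List.getD_eq_getElem _ _ (by omega : i < p.2.length)]
  simp [pvColStep, List.getElem_zip]

-- the column fold, read elementwise
theorem pvFoldCols (pairs : List (List Int × List Int)) (init : List Int)
    (h : ∀ p ∈ pairs, init.length ≤ p.1.length ∧ init.length ≤ p.2.length) :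
    (pairs.foldl pvColStep init).length = init.length ∧
    ∀ i, i < init.length →
      (pairs.foldl pvColStep init).getD i 0
        = pairs.foldl (fun c p => c + if p.1.getD i 0 ≠ p.2.getD i 0 then 1 else 0)
            (init.getD i 0) := by
  induction pairs generalizing init with
  | nil => exact ⟨rfl, fun _ _ => rfl⟩
  | cons p ps ih =>
    have hp := h p (List.mem_cons_self ..)
    have hlen := pvColStep_length init p hp.1 hp.2
    have h' : ∀ q ∈ ps, (pvColStep init p).length ≤ q.1.length ∧ (pvColStep init p).length ≤ q.2.length := by
      intro q hq; rw [hlen]; exact h q (List.mem_cons_of_mem _ hq)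
    have := ih (pvColStep init p) h'
    refine ⟨by simpa [hlen] using this.1, fun i hi => ?_⟩
    simp only [List.foldl_cons]
    rw [this.2 i (by omega), pvColStep_getD init p i hi hp.1 hp.2]

-- the elementwise fold only looks at each pair through its i-th entries
theorem pvFoldProj (pairs : List (List Int × List Int)) (i : Nat) (c : Int) :
    pairs.foldl (fun c p => c + if p.1.getD i 0 ≠ p.2.getD i 0 then 1 else 0) c
      = (pairs.map (fun p => (p.1.getD i 0, p.2.getD i 0))).foldl
          (fun c ab => c + if ab.1 ≠ ab.2 then 1 else 0) c := by
  induction pairs generalizing c with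
  | nil => rfl
  | cons p ps ih => simp only [List.foldl_cons, List.map_cons]; rw [ih]

-- projecting the i-th row out of the zipped column pairs gives the row's lane pairs
theorem pvProjZip {A : Type} (i : Nat) (f : A → List Int) (g : A → Int)
    (h : ∀ a, (f a).getD i 0 = g a) (l : List A) :
    ((l.map f).zip (l.map f).tail).map (fun p => (p.1.getD i 0, p.2.getD i 0))
      = (l.map g).zip ((l.map g).tail) := by
  induction l with
  | nil => rfl
  | cons x t ih =>
    cases t with
    | nil => rfl
    | cons y t' =>
      simp only [List.map_cons, List.tail_cons, List.zip_cons_cons] at ih ⊢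
      rw [ih]
      congr 1
      show ((f x).getD i 0, (f y).getD i 0) = (g x, g y)
      rw [h x, h y]

-- ===== VERDICT (by name: the statement is the Claim_ definition above) =====
theorem get_number_of_lane_changes_spec : Claim_equal_get_number_of_lane_changes := by
  intro data _ hpre
  unfold Spec_get_number_of_lane_changes
  cases data with
  | nil => rfl
  | cons r0 rest =>
    have h2 : List.map ((fun row =>
          (PySem.List.pyRange 1 ((r0.length : Nat) : Int) 1).foldl
            (fun (lc : Int) j =>
              if (PySem.List.pyGetD row j (0, 0)).2 - (PySem.List.pyGetD row (j - 1) (0, 0)).2 ≠ 0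
              then lc + 1 else lc) 0)
          ∘ (fun i => PySem.List.pyGetD (r0 :: rest) i []))
          (PySem.List.pyRange 0 (((r0 :: rest).length : Nat) : Int) 1)
        = List.map (fun row =>
            (PySem.List.pyRange 1 ((r0.length : Nat) : Int) 1).foldl
              (fun (lc : Int) j =>
                if (PySem.List.pyGetD row j (0, 0)).2 - (PySem.List.pyGetD row (j - 1) (0, 0)).2 ≠ 0
                then lc + 1 else lc) 0) (r0 :: rest) := by
      rw [← List.map_map, PySem.List.map_pyGetD_pyRange_zero']
    have hA : get_number_of_lane_changes (r0 :: rest)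
        = (r0 :: rest).map (fun row =>
            (PySem.List.pyRange 1 ((r0.length : Nat) : Int) 1).foldl
              (fun (lc : Int) j =>
                if (PySem.List.pyGetD row j (0, 0)).2 - (PySem.List.pyGetD row (j - 1) (0, 0)).2 ≠ 0
                then lc + 1 else lc) 0) := by
      simp only [get_number_of_lane_changes, PySem.List.pyGetD_zero_cons]
      rw [PySem.List.foldl_append_singleton_eq_map, List.nil_append]
      simpa only [Function.comp_def] using h2
    have hm : (if (r0 :: rest) = ([] : List (List (Int × Int))) then (0 : Nat)
        else (PySem.List.pyGetD (r0 :: rest) 0 []).length) = r0.length := by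
      rw [if_neg (List.cons_ne_nil r0 rest), PySem.List.pyGetD_zero_cons]
    have hB : get_number_of_lane_changes_alt (r0 :: rest)
        = (((List.range r0.length).map
              (fun (j : Nat) => (r0 :: rest).map (fun row => (PySem.List.pyGetD row (j : Int) (0, 0)).2))).zip
            ((List.range r0.length).map
              (fun (j : Nat) => (r0 :: rest).map (fun row => (PySem.List.pyGetD row (j : Int) (0, 0)).2))).tail).foldl
            pvColStep (List.replicate (r0 :: rest).length 0) := by
      simp only [get_number_of_lane_changes_alt]
      rw [hm]
    have hcol : ∀ p ∈ (((List.range r0.length).map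
          (fun (j : Nat) => (r0 :: rest).map (fun row => (PySem.List.pyGetD row (j : Int) (0, 0)).2))).zip
        ((List.range r0.length).map
          (fun (j : Nat) => (r0 :: rest).map (fun row => (PySem.List.pyGetD row (j : Int) (0, 0)).2))).tail),
        (List.replicate (r0 :: rest).length (0 : Int)).length ≤ p.1.length ∧
        (List.replicate (r0 :: rest).length (0 : Int)).length ≤ p.2.length := by
      intro p hp
      obtain ⟨h1, h2'⟩ := List.of_mem_zip hp
      have h2'' := List.mem_of_mem_tail h2'
      simp only [List.mem_map] at h1 h2''
      obtain ⟨j1, _, e1⟩ := h1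
      obtain ⟨j2, _, e2⟩ := h2''
      simp [← e1, ← e2]
    have hfold := pvFoldCols _ (List.replicate (r0 :: rest).length 0) hcol
    rw [hA, hB]
    apply List.ext_getElem
    · rw [hfold.1]; simp
    · intro i hi1 hi2
      have hid : i < (r0 :: rest).length := by simpa using hi1
      have hidr : i < (List.replicate (r0 :: rest).length (0 : Int)).length := by simpa using hid
      rw [List.getElem_map]
      rw [← List.getD_eq_getElem _ 0 hi2, hfold.2 i hidr, List.getD_replicate _ hid, pvFoldProj]
      have hg : ∀ j : Nat,
          (((r0 :: rest).map (fun row => (PySem.List.pyGetD row (j : Int) (0, 0)).2)).getD i 0)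
            = ((r0 :: rest)[i].getD j (0, 0)).2 := by
        intro j
        rw [List.getD_eq_getElem _ 0 (by simpa using hid), List.getElem_map,
          PySem.List.pyGetD_natCast]
      have hmap : ((((List.range r0.length).map
              (fun (j : Nat) => (r0 :: rest).map (fun row => (PySem.List.pyGetD row (j : Int) (0, 0)).2))).zip
            ((List.range r0.length).map
              (fun (j : Nat) => (r0 :: rest).map (fun row => (PySem.List.pyGetD row (j : Int) (0, 0)).2))).tail).map
            (fun p => (p.1.getD i 0, p.2.getD i 0)))
          = ((List.range r0.length).map (fun k => ((r0 :: rest)[i].getD k (0, 0)).2)).zip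
              (((List.range r0.length).map (fun k => ((r0 :: rest)[i].getD k (0, 0)).2)).tail) := by
        exact pvProjZip i _ _ hg (List.range r0.length)
      rw [hmap, pvZipFold, pvRowA (r0 :: rest)[i] r0.length, zero_add]
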